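-- pv_equiv track=rewrite | github.com/MK-Lee13/Algorithm-Study | Programmers/level_1/47_ternary_flip.py | solution
-- ===== SOURCE A (Python) =====
-- def solution(n):
--     answer = 0
--     notation_str = get_k_notation(3, n)
--     notation_count = 0
--     for _str in notation_str:
--         notation_num = int(_str)
--         if notation_num != 0:
--             answer += notation_num * (3 ** notation_count)
--         notation_count += 1
--     return answer
--
-- def get_k_notation(k, n):
--     notation_str = ""
--     while n > 0:
--         notation_str += str(n % k)
--         n = n // k
--     return notation_str[::-1]
-- ===== SOURCE B (Python) =====
-- def solution(n):
--     # Horner accumulation of the base-3 digits least-significant-first: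
--     # builds the digit-reversed number directly, no string helper.
--     answer = 0
--     while n > 0:
--         answer = answer * 3 + n % 3
--         n //= 3
--     return answer
-- ===== Notes on version B (the rewrite author's own statement) =====
-- stated objective: simpler
-- what changed: Replaced the string helper (build ternary string, reverse it, re-parse each char with int() and sum digit*3**k) by a single arithmetic Horner loop answer = answer*3 + n%3 over the base-3 digits.
import Mathlib
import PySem

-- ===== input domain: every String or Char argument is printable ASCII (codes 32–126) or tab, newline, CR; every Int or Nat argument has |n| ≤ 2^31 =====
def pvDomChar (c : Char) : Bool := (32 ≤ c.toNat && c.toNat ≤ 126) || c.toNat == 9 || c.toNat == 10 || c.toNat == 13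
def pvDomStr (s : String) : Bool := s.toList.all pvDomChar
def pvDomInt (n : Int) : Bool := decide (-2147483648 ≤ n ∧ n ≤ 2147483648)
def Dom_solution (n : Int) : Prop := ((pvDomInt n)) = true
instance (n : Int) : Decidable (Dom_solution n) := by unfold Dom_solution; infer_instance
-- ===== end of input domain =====

-- B replaces A's string helper (build ternary string, reverse, re-parse chars, sum digit*3**k)
-- by a single arithmetic Horner loop; objective: simpler.

-- ===== PORT A =====
-- while-loop of get_k_notation (k instantiated to 3, its only call site);
-- strings are handled as their char lists (the PySem.Chars representation).
def gkLoop (n : Int) (acc : List Char) : List Char :=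
  if 0 < n then
    gkLoop (PySem.Int.floordiv n 3) (acc ++ PySem.Int.toChars (PySem.Int.mod n 3))
  else acc
termination_by n.toNat
decreasing_by
  rename_i h
  rw [PySem.Int.floordiv_eq_ediv_of_pos (by omega)]
  omega

def get_k_notation (n : Int) : List Char :=
  -- notation_str[::-1] : slice? … (-1); step -1 ≠ 0 so the .getD is never taken
  (PySem.List.slice? (gkLoop n []) none none (-1)).getD []

def solution (n : Int) : Int :=
  ((get_k_notation n).foldl
    (fun (st : Int × Int) c =>
      let num := (PySem.Int.ofChars? [c]).getD 0  -- int(_str); chars are '0'/'1'/'2', never ValueError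
      (if num ≠ 0 then st.1 + num * 3 ^ st.2.toNat else st.1, st.2 + 1))
    (0, 0)).1

-- ===== PORT B =====
def altLoop (answer n : Int) : Int :=
  if 0 < n then altLoop (answer * 3 + PySem.Int.mod n 3) (PySem.Int.floordiv n 3) else answer
termination_by n.toNat
decreasing_by
  rename_i h
  rw [PySem.Int.floordiv_eq_ediv_of_pos (by omega)]
  omega

def solution_alt (n : Int) : Int := altLoop 0 n

-- ===== PRECONDITION & SPEC =====
def Spec_solution (n : Int) (out : Int) : Prop := out = solution_alt n
instance (n : Int) (out : Int) : Decidable (Spec_solution n out) := by unfold Spec_solution; infer_instance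

-- ===== CLAIM (what is proved, stated in full; the proofs are below) =====
def Claim_equal_solution : Prop := ∀ (n : Int), Dom_solution n → Spec_solution n (solution n)

-- ===== LEMMAS AND PROOFS =====

-- the base-3 digits of n, least-significant first (spec-level helper)
def ds (n : Int) : List Int :=
  if 0 < n then PySem.Int.mod n 3 :: ds (PySem.Int.floordiv n 3) else []
termination_by n.toNat
decreasing_by
  rename_i h
  rw [PySem.Int.floordiv_eq_ediv_of_pos (by omega)]
  omega

lemma ds_digit_bound : ∀ n, ∀ d ∈ ds n, 0 ≤ d ∧ d < 3 := by
  intro n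
  induction n using ds.induct with
  | case1 n h ih =>
    rw [ds, if_pos h]
    intro d hd
    rcases List.mem_cons.mp hd with rfl | hd
    · exact ⟨PySem.Int.mod_nonneg _ (by omega), PySem.Int.mod_lt _ (by omega)⟩
    · exact ih d hd
  | case2 n h => rw [ds, if_neg h]; intro d hd; simp at hd

def chr (d : Int) : Char := Char.ofNat (48 + d.toNat)

lemma toChars_digit {d : Int} (h0 : 0 ≤ d) (h3 : d < 3) :
    PySem.Int.toChars d = [chr d] := by
  have : d = 0 ∨ d = 1 ∨ d = 2 := by omega
  rcases this with rfl | rfl | rfl <;> decide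

lemma ofChars_digit {d : Int} (h0 : 0 ≤ d) (h3 : d < 3) :
    (PySem.Int.ofChars? [chr d]).getD 0 = d := by
  have : d = 0 ∨ d = 1 ∨ d = 2 := by omega
  rcases this with rfl | rfl | rfl <;> decide

lemma gkLoop_eq : ∀ n acc, gkLoop n acc = acc ++ (ds n).flatMap PySem.Int.toChars := by
  intro n
  induction n using ds.induct with
  | case1 n h ih =>
    intro acc
    rw [gkLoop, if_pos h, ih]
    conv_rhs => rw [ds]
    rw [if_pos h]
    simp
  | case2 n h =>
    intro acc
    rw [gkLoop, if_neg h, ds, if_neg h]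
    simp

lemma flatMap_toChars_eq_map {l : List Int} (hb : ∀ d ∈ l, 0 ≤ d ∧ d < 3) :
    l.flatMap PySem.Int.toChars = l.map chr := by
  induction l with
  | nil => rfl
  | cons d t ih =>
    have hd := hb d (List.mem_cons_self ..)
    simp only [List.flatMap_cons, List.map_cons, toChars_digit hd.1 hd.2]
    rw [ih (fun x hx => hb x (List.mem_cons_of_mem _ hx))]
    rfl

def horner (a : Int) (l : List Int) : Int := l.foldl (fun a d => a * 3 + d) a

lemma horner_shift : ∀ l (a : Int), horner a l = a * 3 ^ l.length + horner 0 l := by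
  intro l
  induction l with
  | nil => intro a; simp [horner]
  | cons d t ih =>
    intro a
    have h1 : horner a (d :: t) = horner (a * 3 + d) t := rfl
    have h2 : horner 0 (d :: t) = horner d t := by simp [horner]
    rw [h1, ih (a * 3 + d), h2, ih d]
    simp only [List.length_cons, pow_succ]
    ring

lemma altLoop_eq_horner : ∀ n a, altLoop a n = horner a (ds n) := by
  intro n
  induction n using ds.induct with
  | case1 n h ih =>
    intro a
    rw [altLoop, if_pos h, ih]
    conv_rhs => rw [ds]
    rw [if_pos h]
    rfl
  | case2 n h =>
    intro a
    rw [altLoop, if_neg h, ds, if_neg h]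
    rfl

-- A's loop body as a named step function
def stepA (st : Int × Int) (c : Char) : Int × Int :=
  let num := (PySem.Int.ofChars? [c]).getD 0
  (if num ≠ 0 then st.1 + num * 3 ^ st.2.toNat else st.1, st.2 + 1)

lemma foldA_snd : ∀ (l : List Char) (st : Int × Int),
    (l.foldl stepA st).2 = st.2 + l.length := by
  intro l
  induction l with
  | nil => intro st; simp
  | cons c t ih =>
    intro st
    rw [List.foldl_cons, ih]
    simp only [stepA, List.length_cons]
    push_cast
    ring

lemma fold_rev (l : List Int) (hb : ∀ d ∈ l, 0 ≤ d ∧ d < 3) :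
    ∀ (a : Int) (k : Nat),
      ((l.map chr).reverse.foldl stepA (a, (k : Int))).1 = a + 3 ^ k * horner 0 l := by
  induction l with
  | nil => intro a k; simp [horner]
  | cons d t ih =>
    intro a k
    have hd := hb d (List.mem_cons_self ..)
    have hbt : ∀ x ∈ t, 0 ≤ x ∧ x < 3 := fun x hx => hb x (List.mem_cons_of_mem _ hx)
    simp only [List.map_cons, List.reverse_cons, List.foldl_append, List.foldl_cons,
      List.foldl_nil]
    have hfst := ih hbt a k
    have hsnd := foldA_snd ((t.map chr).reverse) (a, (k : Int))
    set st := ((t.map chr).reverse).foldl stepA (a, (k : Int)) with hst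
    have hstate : st = (a + 3 ^ k * horner 0 t, (k : Int) + t.length) := by
      rcases st with ⟨x, y⟩
      simp only [Prod.mk.injEq]
      constructor
      · exact hfst
      · simpa using hsnd
    rw [hstate]
    simp only [stepA, ofChars_digit hd.1 hd.2]
    have htn : ((k : Int) + (t.length : Int)).toNat = k + t.length := by omega
    have hh : horner 0 (d :: t) = d * 3 ^ t.length + horner 0 t := by
      have h2 : horner 0 (d :: t) = horner d t := by simp [horner]
      rw [h2, horner_shift]
    by_cases hz : d = 0
    · subst hz; simp [hh]
    · rw [if_pos hz, htn, hh, pow_add]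
      ring

lemma solution_eq_alt (n : Int) : solution n = solution_alt n := by
  have hb := ds_digit_bound n
  have hchars : get_k_notation n = ((ds n).map chr).reverse := by
    rw [get_k_notation, PySem.List.slice?_none_none_neg_one, Option.getD_some,
      gkLoop_eq, List.nil_append, flatMap_toChars_eq_map hb]
  have : solution n = (((ds n).map chr).reverse.foldl stepA (0, ((0 : Nat) : Int))).1 := by
    rw [solution, hchars]; rfl
  rw [this, fold_rev (ds n) hb 0 0, solution_alt, altLoop_eq_horner]
  ring

-- ===== VERDICT (by name: the statement is the Claim_ definition above) =====
theorem solution_spec : Claim_equal_solution := by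
  intro n _
  exact solution_eq_alt n
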